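-- pv_equiv track=rewrite | github.com/Spe1eon/Software_Engineering | sem1/lab4/lab4.1.py | find_missing_digits
-- ===== SOURCE A (Python) =====
-- def find_missing_digits(n_str, prev_digit=None):
--     if not n_str:
--         return []
--
--     current_digit = int(n_str[0])
--     remaining_digits = n_str[1:]
--     missing_digits = []
--
--     if prev_digit is not None and current_digit > prev_digit + 1:
--         for missing_digit in range(prev_digit + 1, current_digit):
--             missing_digits.append(missing_digit)
--
--     missing_digits += find_missing_digits(remaining_digits, current_digit)
--     return missing_digits
-- ===== SOURCE B (Python) =====
-- def find_missing_digits(n_str, prev_digit=None):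
--     # Single iterative pass keeping the previous digit; no recursion.
--     result = []
--     prev = prev_digit
--     for c in n_str:
--         cur = int(c)
--         if prev is not None and cur > prev + 1:
--             result.extend(range(prev + 1, cur))
--         prev = cur
--     return result
-- ===== Notes on version B (the rewrite author's own statement) =====
-- stated objective: simpler
-- what changed: Replaces the recursive walk (which rebuilds a list at every call and concatenates sublists) with a single iterative pass that keeps the previous digit and extends one accumulator list.
import Mathlib
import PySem

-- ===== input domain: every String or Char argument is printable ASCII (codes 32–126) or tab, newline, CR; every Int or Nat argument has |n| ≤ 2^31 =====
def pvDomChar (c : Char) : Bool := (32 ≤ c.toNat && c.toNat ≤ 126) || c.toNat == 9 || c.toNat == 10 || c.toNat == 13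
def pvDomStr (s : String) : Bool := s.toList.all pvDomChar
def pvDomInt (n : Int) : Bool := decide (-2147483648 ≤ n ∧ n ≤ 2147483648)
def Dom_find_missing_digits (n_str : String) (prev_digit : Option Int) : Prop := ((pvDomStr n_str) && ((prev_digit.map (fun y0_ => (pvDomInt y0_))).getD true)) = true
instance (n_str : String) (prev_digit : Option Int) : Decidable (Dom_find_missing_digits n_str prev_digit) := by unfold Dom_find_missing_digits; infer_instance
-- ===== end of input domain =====

-- B is a single iterative pass instead of A's recursion; equivalence of return values on all-digit strings.

-- ===== PORT A =====
-- recursive transliteration of A over the character list of n_str;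
-- int(c) = PySem.Int.ofStr? (exact); none (ValueError) is outside Pre_ and yields []
def fmdA : List Char → Option Int → List Int
  | [], _ => []
  | c :: remaining_digits, prev_digit =>
    match PySem.Int.ofStr? (String.ofList [c]) with
    | none => []   -- int() raises ValueError here; excluded by Pre_
    | some current_digit =>
      let missing_digits : List Int :=
        match prev_digit with
        | some p => if current_digit > p + 1 then PySem.List.pyRange (p + 1) current_digit 1 else []
        | none => []
      missing_digits ++ fmdA remaining_digits (some current_digit)

def find_missing_digits (n_str : String) (prev_digit : Option Int) : List Int :=
  fmdA n_str.toList prev_digit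

-- ===== PORT B =====
-- single fold over the characters carrying (result, prev)
def fmdBStep (st : List Int × Option Int) (c : Char) : List Int × Option Int :=
  match PySem.Int.ofStr? (String.ofList [c]) with
  | none => st   -- int() raises ValueError here; excluded by Pre_
  | some cur =>
    let result :=
      match st.2 with
      | some p => if cur > p + 1 then st.1 ++ PySem.List.pyRange (p + 1) cur 1 else st.1
      | none => st.1
    (result, some cur)

def find_missing_digits_alt (n_str : String) (prev_digit : Option Int) : List Int :=
  (n_str.toList.foldl fmdBStep ([], prev_digit)).1

-- ===== PRECONDITION & SPEC =====
-- Pre_ excludes exactly the strings containing a non-digit character, on which A's int() raises ValueError.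
def Pre_find_missing_digits (n_str : String) (prev_digit : Option Int) : Prop :=
  n_str.toList.all (fun c => 48 ≤ c.toNat && c.toNat ≤ 57) = true
instance (n_str : String) (prev_digit : Option Int) : Decidable (Pre_find_missing_digits n_str prev_digit) := by unfold Pre_find_missing_digits; infer_instance

def pvWitness_find_missing_digits : String × Option Int := ("13058", some 0)

def Spec_find_missing_digits (n_str : String) (prev_digit : Option Int) (out : List Int) : Prop := out = find_missing_digits_alt n_str prev_digit
instance (n_str : String) (prev_digit : Option Int) (out : List Int) : Decidable (Spec_find_missing_digits n_str prev_digit out) := by unfold Spec_find_missing_digits; infer_instance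

-- ===== CLAIM (what is proved, stated in full; the proofs are below) =====
def Claim_equal_find_missing_digits : Prop := ∀ (n_str : String) (prev_digit : Option Int), Dom_find_missing_digits n_str prev_digit → Pre_find_missing_digits n_str prev_digit → Spec_find_missing_digits n_str prev_digit (find_missing_digits n_str prev_digit)

-- ===== LEMMAS AND PROOFS =====

-- on a digit character, int(c) = some (code - 48)
theorem ofStr_digit (c : Char) (h1 : 48 ≤ c.toNat) (h2 : c.toNat ≤ 57) :
    PySem.Int.ofStr? (String.ofList [c]) = some ((c.toNat : Int) - 48) := by
  have hofn : Char.ofNat c.toNat = c := Char.ofNat_toNat c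
  have hcases : c.toNat = 48 ∨ c.toNat = 49 ∨ c.toNat = 50 ∨ c.toNat = 51 ∨ c.toNat = 52 ∨
      c.toNat = 53 ∨ c.toNat = 54 ∨ c.toNat = 55 ∨ c.toNat = 56 ∨ c.toNat = 57 := by omega
  rcases hcases with h | h | h | h | h | h | h | h | h | h <;>
    (rw [← hofn, h]; decide)

theorem fold_eq_rec (l : List Char) (prev : Option Int) (acc : List Int)
    (h : ∀ c ∈ l, (48 ≤ c.toNat && c.toNat ≤ 57) = true) :
    (l.foldl fmdBStep (acc, prev)).1 = acc ++ fmdA l prev := by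
  induction l generalizing prev acc with
  | nil => simp [fmdA]
  | cons c rest ih =>
    have hb := h c List.mem_cons_self
    simp only [Bool.and_eq_true, decide_eq_true_eq] at hb
    have hc := ofStr_digit c hb.1 hb.2
    have hrest : ∀ x ∈ rest, (48 ≤ x.toNat && x.toNat ≤ 57) = true :=
      fun x hx => h x (List.mem_cons_of_mem _ hx)
    rw [List.foldl_cons]
    cases prev with
    | none =>
      simp only [fmdBStep, hc, fmdA]
      rw [ih _ _ hrest]
      simp
    | some p =>
      by_cases hgt : ((c.toNat : Int) - 48) > p + 1
      · simp only [fmdBStep, hc, fmdA, if_pos hgt]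
        rw [ih _ _ hrest, List.append_assoc]
      · simp only [fmdBStep, hc, fmdA, if_neg hgt]
        rw [ih _ _ hrest]
        simp

-- ===== VERDICT (by name: the statement is the Claim_ definition above) =====
theorem find_missing_digits_spec : Claim_equal_find_missing_digits := by
  intro n_str prev_digit _ hpre
  unfold Pre_find_missing_digits at hpre
  unfold Spec_find_missing_digits find_missing_digits find_missing_digits_alt
  have h := List.all_eq_true.mp hpre
  simpa using (fold_eq_rec n_str.toList prev_digit [] h).symm
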